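-- pv_equiv track=rewrite | github.com/Ryu4824/Programmers | Lv1 과일 장수.py | solution
-- ===== SOURCE A (Python) =====
-- def solution(k, m, score):
--     answer = 0
--     score=sorted(score)
--     for i in range(len(score),0,-m):
--         ch = i-m
--         if ch >= 0:
--             answer+=score[ch]*m
--     return answer
-- ===== SOURCE B (Python) =====
-- def solution(k, m, score):
--     pool = list(score)
--     total = 0
--     for _ in range(len(score) // m):
--         top = 0
--         for _ in range(m):
--             top = max(pool)
--             pool.remove(top)
--         total += top * m
--     return total
-- ===== Notes on version B (the rewrite author's own statement) =====
-- stated objective: alternative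
-- what changed: B does not sort at all: for each of the len(score)//m boxes it repeatedly extracts the maximum from the remaining pool (max + remove, selection style) and adds the last extracted value, the box minimum, times m, instead of A's sort followed by a backward stride with index arithmetic.
import Mathlib
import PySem

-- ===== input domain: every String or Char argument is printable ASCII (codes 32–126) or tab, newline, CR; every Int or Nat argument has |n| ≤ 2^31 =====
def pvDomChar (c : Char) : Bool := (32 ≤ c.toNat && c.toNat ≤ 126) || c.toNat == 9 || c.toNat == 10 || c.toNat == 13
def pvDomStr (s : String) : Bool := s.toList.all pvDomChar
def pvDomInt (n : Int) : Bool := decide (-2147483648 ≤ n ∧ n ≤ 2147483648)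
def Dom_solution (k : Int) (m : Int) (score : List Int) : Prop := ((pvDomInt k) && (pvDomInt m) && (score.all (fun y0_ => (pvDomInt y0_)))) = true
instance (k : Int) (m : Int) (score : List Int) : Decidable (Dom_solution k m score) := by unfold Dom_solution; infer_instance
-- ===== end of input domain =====

-- B never sorts: it fills each of the len(score)//m boxes by repeatedly extracting
-- the maximum from the remaining pool (selection), adding the last extracted value
-- (the box minimum) times m; A sorts and strides backwards over the sorted array.

-- ===== PORT A =====
def solution (k : Int) (m : Int) (score : List Int) : Int :=
  let s := PySem.List.sorted score (fun x => x) false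
  (PySem.List.pyRange (s.length : Int) 0 (-m)).foldl
    (fun answer i =>
      let ch := i - m
      if ch ≥ 0 then answer + PySem.List.pyGetD s ch 0 * m else answer) 0

-- ===== PORT B =====
-- 'top = max(pool); pool.remove(top)'; the none branch is Python's ValueError on
-- an empty pool, unreachable under Pre_ (each of the len//m boxes finds m elements).
def popMax (st : List Int × Int) : List Int × Int :=
  match PySem.List.max? st.1 (fun x => x) with
  | some top => ((PySem.List.remove? st.1 top).getD st.1, top)
  | none => st

def solution_alt (k : Int) (m : Int) (score : List Int) : Int :=
  ((PySem.List.pyRange 0 (PySem.Int.floordiv (score.length : Int) m) 1).foldl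
    (fun (st : List Int × Int) _ =>
      let inner := (PySem.List.pyRange 0 m 1).foldl (fun s2 _ => popMax s2) (st.1, 0)
      (inner.1, st.2 + inner.2 * m)) (score, 0)).2

-- ===== PRECONDITION & SPEC =====
-- Pre_ excludes exactly m = 0, where both Pythons raise (A: ValueError from range
-- step 0; B: ZeroDivisionError from len(score) // m).
def Pre_solution (k : Int) (m : Int) (score : List Int) : Prop := m ≠ 0
instance (k : Int) (m : Int) (score : List Int) : Decidable (Pre_solution k m score) := by unfold Pre_solution; infer_instance
def pvWitness_solution : Int × Int × List Int := (4, 2, [1, 2, 3, 1, 2])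

def Spec_solution (k : Int) (m : Int) (score : List Int) (out : Int) : Prop := out = solution_alt k m score
instance (k : Int) (m : Int) (score : List Int) (out : Int) : Decidable (Spec_solution k m score out) := by unfold Spec_solution; infer_instance

-- ===== CLAIM (what is proved, stated in full; the proofs are below) =====
def Claim_equal_solution : Prop := ∀ (k : Int) (m : Int) (score : List Int), Dom_solution k m score → Pre_solution k m score → Spec_solution k m score (solution k m score)

-- ===== LEMMAS AND PROOFS =====

-- two loops that ignore their elements and have the same trip count are equal
lemma foldl_ignore₂ {α β γ : Type} (g : α → β → α) (g' : α → γ → α)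
    (hg : ∀ a b c, g a b = g' a c) :
    ∀ (l : List β) (l' : List γ), l.length = l'.length → ∀ (a : α),
      l.foldl g a = l'.foldl g' a := by
  intro l
  induction l with
  | nil => intro l' h a; cases l' <;> simp_all
  | cons x t ih =>
    intro l' h a
    cases l' with
    | nil => simp at h
    | cons y t' =>
      simp only [List.foldl_cons]
      rw [hg a x y]
      exact ih t' (by simpa using h) (g' a y)

-- one iteration of the inner loop: the pool is a permutation of v :: rest with v maximal
lemma popMax_eq (p rest : List Int) (x v : Int) (hp : p.Perm (v :: rest))
    (hub : ∀ y ∈ rest, y ≤ v) : popMax (p, x) = (p.erase v, v) := by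
  have hvp : v ∈ p := hp.mem_iff.mpr (List.mem_cons_self)
  cases hmax : PySem.List.max? p (fun x => x) with
  | none =>
    exact absurd ((PySem.List.max?_eq_none_iff p _).mp hmax) (List.ne_nil_of_mem hvp)
  | some w =>
    have hwp : w ∈ p := PySem.List.max?_mem hmax
    have hwv : w ≤ v := by
      rcases List.mem_cons.mp (hp.mem_iff.mp hwp) with h | h
      · exact le_of_eq h
      · exact hub w h
    have hvw : v ≤ w := PySem.List.max?_isMax hmax v hvp
    have hwv' : w = v := le_antisymm hwv hvw
    subst hwv'
    simp [popMax, hmax, PySem.List.remove?_eq_some_erase p w hwp]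

-- t pops from a pool that is a permutation of a descending list l take l's first t
-- elements; the last value popped is l[t-1]
lemma pops (t : Nat) (l p : List Int) (x : Int) (hp : p.Perm l)
    (hl : l.Pairwise (· ≥ ·)) (ht : t ≤ l.length) :
    ((List.range t).foldl (fun s2 _ => popMax s2) (p, x)).1.Perm (l.drop t) ∧
    (0 < t → ((List.range t).foldl (fun s2 _ => popMax s2) (p, x)).2 = l.getD (t - 1) 0) := by
  induction t with
  | zero => simpa using hp
  | succ t ih =>
    obtain ⟨ih1, -⟩ := ih (by omega)
    rw [List.range_succ, List.foldl_append]
    set r := (List.range t).foldl (fun s2 _ => popMax s2) (p, x) with hr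
    have htlen : t < l.length := by omega
    have hdrop : l.drop t = l[t] :: l.drop (t + 1) := List.drop_eq_getElem_cons htlen
    have hpw : (l.drop t).Pairwise (· ≥ ·) := hl.sublist (List.drop_sublist t l)
    have hub : ∀ y ∈ l.drop (t + 1), y ≤ l[t] := by
      rw [hdrop] at hpw
      exact fun y hy => (List.pairwise_cons.mp hpw).1 y hy
    have hperm : r.1.Perm (l[t] :: l.drop (t + 1)) := hdrop ▸ ih1
    have hpop : popMax (r.1, r.2) = (r.1.erase l[t], l[t]) :=
      popMax_eq r.1 (l.drop (t + 1)) r.2 l[t] hperm hub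
    have hre : r = (r.1, r.2) := rfl
    rw [List.foldl_cons, List.foldl_nil, hre, hpop]
    constructor
    · have h3 := List.Perm.erase l[t] hperm
      have h2 : (l[t] :: l.drop (t + 1)).erase l[t] = l.drop (t + 1) := by
        rw [List.erase_cons_head]
      rw [h2] at h3
      exact h3
    · intro _
      simp only [Nat.add_sub_cancel]
      exact (List.getD_eq_getElem l 0 htlen).symm

-- the outer loop: after j boxes the pool is a permutation of d.drop (j*mn) and the
-- total is the sum of d[(c+1)*mn - 1] * m over the boxes filled so far
lemma boxes (m : Int) (mn : Nat) (hmn : 0 < mn) (d : List Int) (hd : d.Pairwise (· ≥ ·))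
    (p0 : List Int) (h0 : p0.Perm d) :
    ∀ (j : Nat), j * mn ≤ d.length →
    ((List.range j).foldl
       (fun (st : List Int × Int) (_ : Nat) =>
         let inner := (List.range mn).foldl (fun s2 _ => popMax s2) (st.1, 0)
         (inner.1, st.2 + inner.2 * m)) (p0, 0)).1.Perm (d.drop (j * mn)) ∧
    ((List.range j).foldl
       (fun (st : List Int × Int) (_ : Nat) =>
         let inner := (List.range mn).foldl (fun s2 _ => popMax s2) (st.1, 0)
         (inner.1, st.2 + inner.2 * m)) (p0, 0)).2
      = ((List.range j).map (fun c => d.getD ((c + 1) * mn - 1) 0 * m)).sum := by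
  intro j
  induction j with
  | zero => simpa using h0
  | succ j ih =>
    intro hj
    have e1 : (j + 1) * mn = j * mn + mn := Nat.succ_mul j mn
    obtain ⟨ih1, ih2⟩ := ih (by omega)
    rw [List.range_succ, List.foldl_append, List.foldl_cons, List.foldl_nil]
    set r := (List.range j).foldl
       (fun (st : List Int × Int) (_ : Nat) =>
         let inner := (List.range mn).foldl (fun s2 _ => popMax s2) (st.1, 0)
         (inner.1, st.2 + inner.2 * m)) (p0, 0) with hr
    have hlen : mn ≤ (d.drop (j * mn)).length := by
      rw [List.length_drop]; omega
    have hpw : (d.drop (j * mn)).Pairwise (· ≥ ·) := hd.sublist (List.drop_sublist _ d)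
    obtain ⟨hin1, hin2⟩ := pops mn (d.drop (j * mn)) r.1 0 ih1 hpw hlen
    refine ⟨?_, ?_⟩
    · refine List.Perm.trans hin1 ?_
      rw [List.drop_drop]
      have hjm : j * mn + mn = (j + 1) * mn := by ring
      rw [hjm]
    · show r.2 + ((List.range mn).foldl (fun s2 _ => popMax s2) (r.1, 0)).2 * m = _
      rw [ih2, hin2 hmn, List.map_append, List.sum_append]
      have h1 : mn - 1 < (d.drop (j * mn)).length := by omega
      have h2 : (j + 1) * mn - 1 < d.length := by
        rw [List.length_drop] at h1; omega
      have hidx : (d.drop (j * mn)).getD (mn - 1) 0 = d.getD ((j + 1) * mn - 1) 0 := by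
        rw [List.getD_eq_getElem _ 0 h1, List.getD_eq_getElem _ 0 h2, List.getElem_drop]
        congr 1
        omega
      rw [hidx]
      simp

-- range(n, 0, -m) for 0 < m written as a map over List.range
lemma pyRange_down (n m : Int) (hm : 0 < m) :
    PySem.List.pyRange n 0 (-m)
      = (List.range (if 0 < n then ((n + m - 1) / m).toNat else 0)).map
          (fun c : Nat => n + -m * (c : Int)) := by
  unfold PySem.List.pyRange
  rw [if_neg (by omega), if_neg (by omega)]
  simp only [neg_neg, sub_zero]

-- A's loop written as a sum
lemma foldlA_sum (s : List Int) (n m : Int) :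
    ∀ (N : Nat) (a : Int),
      (List.range N).foldl
        (fun answer (c : Nat) =>
          if n + -m * (c : Int) - m ≥ 0
          then answer + PySem.List.pyGetD s (n + -m * (c : Int) - m) 0 * m
          else answer) a
      = a + ((List.range N).map
          (fun c : Nat =>
            if n + -m * (c : Int) - m ≥ 0
            then PySem.List.pyGetD s (n + -m * (c : Int) - m) 0 * m
            else 0)).sum := by
  intro N
  induction N with
  | zero => simp
  | succ N ih =>
    intro a
    rw [List.range_succ, List.foldl_append, List.map_append, List.sum_append, ih a]
    simp only [List.foldl_cons, List.foldl_nil, List.map_cons, List.map_nil, List.sum_cons,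
      List.sum_nil]
    split_ifs <;> ring

-- a sum over range N of a function vanishing from q on is the sum over range q
lemma sum_ite_prefix (F : Nat → Int) (q : Nat) :
    ∀ (N : Nat), q ≤ N →
      ((List.range N).map (fun c => if c < q then F c else 0)).sum
        = ((List.range q).map F).sum := by
  intro N
  induction N with
  | zero => intro h; interval_cases q; simp
  | succ N ih =>
    intro h
    by_cases hq : q ≤ N
    · rw [List.range_succ, List.map_append, List.sum_append, ih hq]
      simp [Nat.not_lt.mpr hq]
    · have hq' : q = N + 1 := by omega
      subst hq'
      refine congrArg List.sum (List.map_congr_left ?_)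
      intro c hc
      rw [List.mem_range] at hc
      simp [hc]

-- floor division of a nonnegative int by a negative one is nonpositive
lemma fdiv_negSucc_nonpos (a b : Nat) : Int.fdiv (a : Int) (Int.negSucc b) ≤ 0 := by
  cases a with
  | zero => simp [Int.fdiv]
  | succ a =>
    show Int.negSucc (a / (b + 1)) ≤ 0
    exact le_of_lt (Int.negSucc_lt_zero _)

lemma floordiv_nonpos_of_neg (n m : Int) (hn : 0 ≤ n) (hm : m < 0) :
    PySem.Int.floordiv n m ≤ 0 := by
  obtain ⟨a, rfl⟩ := Int.eq_ofNat_of_zero_le hn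
  obtain ⟨b, rfl⟩ : ∃ b : Nat, m = Int.negSucc b := by
    cases m with
    | ofNat c => exact absurd hm (not_lt.mpr (Int.natCast_nonneg c))
    | negSucc b => exact ⟨b, rfl⟩
  exact fdiv_negSucc_nonpos a b

lemma solution_eq_of_pos (k m : Int) (score : List Int) (hm : 0 < m) :
    solution k m score = solution_alt k m score := by
  have hmn : (m.toNat : Int) = m := Int.toNat_of_nonneg (le_of_lt hm)
  have hmn0 : 0 < m.toNat := by omega
  simp only [solution, solution_alt]
  set s := PySem.List.sorted score (fun x => x) false with hs
  have hsp : List.Pairwise (· ≤ ·) s := PySem.List.sorted_pairwise score (fun x => x)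
  set n := s.length with hn
  have hlen : score.length = n := (PySem.List.sorted_perm score (fun x => x) false).length_eq.symm
  set d := s.reverse with hd
  have hdp : List.Pairwise (· ≥ ·) d := by
    rw [hd, List.pairwise_reverse]
    exact hsp
  have hperm0 : score.Perm d :=
    (PySem.List.sorted_perm score (fun x => x) false).symm.trans (List.reverse_perm s).symm
  have hdlen : d.length = n := by rw [hd, List.length_reverse]
  -- the box count
  set F := PySem.Int.floordiv (score.length : Int) m with hF
  have hFn : F = PySem.Int.floordiv (n : Int) m := by rw [hF, hlen]
  have hFed : F = (n : Int) / m := by rw [hFn, PySem.Int.floordiv_eq_ediv_of_pos hm]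
  have hF0 : 0 ≤ F := by
    rw [hFed]
    exact Int.ediv_nonneg (by positivity) (le_of_lt hm)
  set q := F.toNat with hq
  have hqF : (q : Int) = F := Int.toNat_of_nonneg hF0
  have hqmn : q * m.toNat ≤ n := by
    have h1 : (q : Int) ≤ PySem.Int.floordiv (n : Int) m := by rw [hqF, hFn]
    have h2 : (q : Int) * m ≤ (n : Int) := (PySem.Int.le_floordiv_iff_mul_le hm).mp h1
    rw [← hmn] at h2
    exact_mod_cast h2
  -- B's two loops over pyRanges are the same loops over List.range
  have hinner : ∀ (p : List Int) (x : Int),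
      (PySem.List.pyRange 0 m 1).foldl (fun s2 _ => popMax s2) (p, x)
        = (List.range m.toNat).foldl (fun s2 _ => popMax s2) (p, x) := by
    intro p x
    exact foldl_ignore₂ (fun s2 _ => popMax s2) (fun s2 _ => popMax s2) (fun a b c => rfl)
      (PySem.List.pyRange 0 m 1) (List.range m.toNat)
      (by simp [PySem.List.length_pyRange_one]) (p, x)
  have hBout : ((PySem.List.pyRange 0 F 1).foldl
      (fun (st : List Int × Int) (_ : Int) =>
        let inner := (PySem.List.pyRange 0 m 1).foldl (fun s2 _ => popMax s2) (st.1, 0)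
        (inner.1, st.2 + inner.2 * m)) (score, 0))
      = ((List.range q).foldl
      (fun (st : List Int × Int) (_ : Nat) =>
        let inner := (List.range m.toNat).foldl (fun s2 _ => popMax s2) (st.1, 0)
        (inner.1, st.2 + inner.2 * m)) (score, 0)) := by
    refine foldl_ignore₂ _ _ ?_ _ _ ?_ _
    · intro a b c
      simp only [hinner]
    · simp [PySem.List.length_pyRange_one, hq]
  obtain ⟨-, hB2⟩ := boxes m m.toNat hmn0 d hdp score hperm0 q (by rw [hdlen]; exact hqmn)
  rw [hBout, hB2]
  -- A's loop as a sum
  rw [pyRange_down (n : Int) m hm]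
  simp only [List.foldl_map]
  rw [foldlA_sum s (n : Int) m _ 0]
  -- each term of A's sum is B's term below q and 0 from q on
  have hterm : ∀ c : Nat,
      (if (n : Int) + -m * (c : Int) - m ≥ 0
       then PySem.List.pyGetD s ((n : Int) + -m * (c : Int) - m) 0 * m
       else 0)
      = (if c < q then d.getD ((c + 1) * m.toNat - 1) 0 * m else 0) := by
    intro c
    have hcond : ((n : Int) + -m * (c : Int) - m ≥ 0) ↔ c < q := by
      have hiff : ((c : Int) + 1) ≤ PySem.Int.floordiv (n : Int) m ↔ ((c : Int) + 1) * m ≤ n :=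
        PySem.Int.le_floordiv_iff_mul_le hm
      rw [← hFn] at hiff
      have hmc : ((c : Int) + 1) * m = m * (c : Int) + m := by ring
      rw [hmc] at hiff
      constructor
      · intro h
        have h2 : m * (c : Int) + m ≤ n := by linarith
        have h3 : (c : Int) + 1 ≤ F := hiff.mpr h2
        omega
      · intro h
        have h3 : (c : Int) + 1 ≤ F := by omega
        have h2 := hiff.mp h3
        linarith
    by_cases hc : c < q
    · rw [if_pos (hcond.mpr hc), if_pos hc]
      set e := (c + 1) * m.toNat with he
      have heI : (e : Int) = ((c : Int) + 1) * m := by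
        rw [he]
        push_cast [hmn]
        ring
      have hce : e ≤ n := le_trans (Nat.mul_le_mul_right _ (by omega)) hqmn
      have he1 : 1 ≤ e := by
        rw [he]
        exact Nat.one_le_iff_ne_zero.mpr (Nat.mul_ne_zero (by omega) (by omega))
      have hn1 : 1 ≤ n := le_trans he1 hce
      have hiI : (n : Int) + -m * (c : Int) - m = (n : Int) - (e : Int) := by
        rw [heI]; ring
      have hgd : PySem.List.pyGetD s ((n : Int) + -m * (c : Int) - m) 0 = s[n - e]'(by omega) := by
        rw [PySem.List.pyGetD_eq_getElem s 0 (by omega) (by rw [hn]; omega)]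
        congr 1
        omega
      have hdd : d.getD (e - 1) 0 = s[n - e]'(by omega) := by
        rw [List.getD_eq_getElem d 0 (by rw [hdlen]; omega)]
        have hrev : d[e - 1]'(by rw [hdlen]; omega) = s[s.length - 1 - (e - 1)]'(by omega) :=
          List.getElem_reverse _
        rw [hrev]
        congr 1
        omega
      rw [hgd, hdd]
    · rw [if_neg (fun h => hc (hcond.mp h)), if_neg hc]
  simp only [hterm]
  -- the terms from q to Nc are all 0
  have hqNc : q ≤ (if 0 < (n : Int) then (((n : Int) + m - 1) / m).toNat else 0) := by
    rcases Nat.eq_zero_or_pos n with h0 | h0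
    · have : F = 0 := by rw [hFed, h0]; simp
      omega
    · rw [if_pos (by omega)]
      have h1 : (n : Int) / m ≤ ((n : Int) + m - 1) / m :=
        Int.ediv_le_ediv hm (by omega)
      have h2 : F ≤ ((n : Int) + m - 1) / m := by rw [hFed]; exact h1
      omega
  rw [sum_ite_prefix _ q _ hqNc]
  simp

-- ===== VERDICT (by name: the statement is the Claim_ definition above) =====
theorem solution_spec : Claim_equal_solution := by
  intro k m score _ hpre
  unfold Spec_solution
  rcases lt_or_gt_of_ne hpre with hneg | hpos
  · -- m < 0: A's range is empty and len(score)//m ≤ 0 so B's range is empty too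
    simp only [solution, solution_alt]
    have h1 : PySem.List.pyRange ((PySem.List.sorted score (fun x => x) false).length : Int) 0 (-m) = [] := by
      unfold PySem.List.pyRange
      rw [if_neg (by omega), if_pos (by omega), if_neg (by omega)]
      simp
    have hfd : PySem.Int.floordiv (score.length : Int) m ≤ 0 :=
      floordiv_nonpos_of_neg _ m (by positivity) hneg
    have h2 : PySem.List.pyRange 0 (PySem.Int.floordiv (score.length : Int) m) 1 = [] :=
      PySem.List.pyRange_one_eq_nil hfd
    rw [h1, h2]
    rfl
  · exact solution_eq_of_pos k m score hpos
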